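-- pv_equiv track=rewrite | github.com/Aditya21196/applied-crypt-project1 | decryption/permutation.py | gen_all_permutation_keys
-- ===== SOURCE A (Python) =====
-- def gen_all_permutation_keys(key_space):
--     """
--     Input, an array of integers representing how many options for each position
--     Output, all possible combinations of integers
--     """
--     candidates = []
--     if len(key_space) == 1:  # base case
--         for i in range(key_space[0]):
--             candidates.append([i])
--     else:
--         suffix = gen_all_permutation_keys(key_space[1:])
--         for i in range(key_space[0]):
--             for entry in suffix:
--                 permutation = [i] + entry
--                 candidates.append(permutation)
--     return candidates
-- ===== SOURCE B (Python) =====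
-- def _digits(key_space, k):
--     entry = []
--     for n in reversed(key_space):
--         entry.append(k % n)
--         k //= n
--     entry.reverse()
--     return entry
--
--
-- def gen_all_permutation_keys(key_space):
--     total = 1
--     for n in key_space:
--         total *= max(n, 0)
--     return [_digits(key_space, k) for k in range(total)]
-- ===== Notes on version B (the rewrite author's own statement) =====
-- stated objective: faster
-- what changed: Replaces A's suffix-building recursion by closed-form mixed-radix decoding: total = product of max(n,0), and the k-th output is the base-key_space digit expansion of k, so no intermediate candidate lists are built and a list containing any count <= 0 yields [] in O(len); Pre_ excludes only the empty list, where A raises RecursionError.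
-- outside the precondition, e.g. on gen_all_permutation_keys([]): A raises RecursionError, B returns [[]]
import Mathlib
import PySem

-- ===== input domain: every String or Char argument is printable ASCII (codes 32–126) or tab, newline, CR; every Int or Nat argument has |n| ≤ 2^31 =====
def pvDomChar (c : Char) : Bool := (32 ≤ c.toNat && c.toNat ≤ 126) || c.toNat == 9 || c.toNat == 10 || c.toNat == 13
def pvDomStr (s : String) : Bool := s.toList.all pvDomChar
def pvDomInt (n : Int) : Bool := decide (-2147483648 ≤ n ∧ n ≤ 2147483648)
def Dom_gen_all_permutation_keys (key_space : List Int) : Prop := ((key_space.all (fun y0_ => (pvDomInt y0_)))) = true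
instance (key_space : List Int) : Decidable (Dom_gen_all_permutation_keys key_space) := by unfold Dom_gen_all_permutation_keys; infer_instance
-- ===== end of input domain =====

-- B replaces A's suffix-building recursion by mixed-radix decoding of each index (same order, same values); on [] A infinite-recurses while B returns [[]].

-- ===== PORT A =====
-- candidates.append(x) is ported as Array.push (Python's O(1) append); the list is read back at the end.
def genA_aux (key_space : List Int) : Array (List Int) :=
  match key_space with
  | [] => #[]  -- unreachable: Python A infinite-recurses on []; excluded by Pre_
  | [x] =>  -- base case: len(key_space) == 1
      (PySem.List.pyRange 0 x 1).foldl (fun candidates i => candidates.push [i]) #[]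
  | x :: rest =>
      let suffix := genA_aux rest
      (PySem.List.pyRange 0 x 1).foldl (fun candidates i =>
        suffix.foldl (fun cs entry => cs.push (i :: entry)) candidates) #[]

def gen_all_permutation_keys (key_space : List Int) : List (List Int) :=
  (genA_aux key_space).toList

-- ===== PORT B =====
-- helper _digits: entry.append(k % n); k //= n over reversed(key_space), then entry.reverse()
def gen_digits (key_space : List Int) (k : Int) : List Int :=
  (key_space.reverse.foldl
    (fun (st : Int × List Int) n => (PySem.Int.floordiv st.1 n, st.2 ++ [PySem.Int.mod st.1 n]))
    (k, [])).2.reverse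

def gen_all_permutation_keys_alt (key_space : List Int) : List (List Int) :=
  let total := key_space.foldl (fun t n => t * max n 0) 1
  (PySem.List.pyRange 0 total 1).map (fun k => gen_digits key_space k)

-- ===== PRECONDITION & SPEC =====
-- Pre_ excludes only the empty list, on which Python A raises RecursionError.
def Pre_gen_all_permutation_keys (key_space : List Int) : Prop := key_space ≠ []
instance (key_space : List Int) : Decidable (Pre_gen_all_permutation_keys key_space) := by unfold Pre_gen_all_permutation_keys; infer_instance
def pvWitness_gen_all_permutation_keys : List Int := [2, 3]

def Spec_gen_all_permutation_keys (key_space : List Int) (out : List (List Int)) : Prop := out = gen_all_permutation_keys_alt key_space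
instance (key_space : List Int) (out : List (List Int)) : Decidable (Spec_gen_all_permutation_keys key_space out) := by unfold Spec_gen_all_permutation_keys; infer_instance

-- ===== CLAIM (what is proved, stated in full; the proofs are below) =====
def Claim_equal_gen_all_permutation_keys : Prop := ∀ (key_space : List Int), Dom_gen_all_permutation_keys key_space → Pre_gen_all_permutation_keys key_space → Spec_gen_all_permutation_keys key_space (gen_all_permutation_keys key_space)

-- ===== LEMMAS AND PROOFS =====

/-- Reference form of the cartesian product, head-first. -/
def pvProd : List Int → List (List Int)
  | [] => [[]]
  | x :: r => (PySem.List.pyRange 0 x 1).flatMap (fun i => (pvProd r).map (fun e => i :: e))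

-- ---- port A equals pvProd ----

theorem foldl_push_toList {α β : Type} (l : List α) (f : α → β) (arr : Array β) :
    (l.foldl (fun a x => a.push (f x)) arr).toList = arr.toList ++ l.map f := by
  induction l generalizing arr with
  | nil => simp
  | cons x t ih => rw [List.foldl_cons, ih]; simp

theorem foldl_nested_push_toList (l : List Int) (suffix : Array (List Int))
    (arr : Array (List Int)) :
    (l.foldl (fun candidates i =>
        suffix.foldl (fun cs entry => cs.push (i :: entry)) candidates) arr).toList
    = arr.toList ++ l.flatMap (fun i => suffix.toList.map (fun e => i :: e)) := by
  induction l generalizing arr with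
  | nil => simp
  | cons x t ih =>
      have hstep : suffix.foldl (fun cs entry => cs.push (x :: entry)) arr
          = suffix.toList.foldl (fun cs entry => cs.push (x :: entry)) arr :=
        Eq.symm (Array.foldl_toList _)
      simp only [List.foldl_cons, ih, hstep, foldl_push_toList]
      simp

theorem gen_eq_pvProd (ks : List Int) (h : ks ≠ []) : gen_all_permutation_keys ks = pvProd ks := by
  induction ks with
  | nil => exact absurd rfl h
  | cons x r ih =>
      cases r with
      | nil =>
          simp only [gen_all_permutation_keys, genA_aux, pvProd, foldl_push_toList,
                     List.nil_append]
          exact List.map_eq_flatMap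
      | cons y s =>
          rw [show gen_all_permutation_keys (x :: y :: s)
              = ((PySem.List.pyRange 0 x 1).foldl (fun candidates i =>
                  (genA_aux (y :: s)).foldl
                    (fun cs entry => cs.push (i :: entry)) candidates) #[]).toList from rfl]
          rw [foldl_nested_push_toList]
          have hsuffix : (genA_aux (y :: s)).toList = pvProd (y :: s) := ih (by simp)
          rw [hsuffix]
          simp [pvProd]

-- ---- port B equals pvProd ----

/-- the running total `total *= max(n, 0)`. -/
def pvTotal (ks : List Int) : Int := ks.foldl (fun t n => t * max n 0) 1

/-- structural form of B's reversed digit fold. -/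
def pvG : List Int → Int → Int × List Int
  | [], k => (k, [])
  | x :: r, k =>
      (PySem.Int.floordiv (pvG r k).1 x, (pvG r k).2 ++ [PySem.Int.mod (pvG r k).1 x])

theorem gfold (ks : List Int) (k : Int) :
    ks.reverse.foldl
      (fun (st : Int × List Int) n => (PySem.Int.floordiv st.1 n, st.2 ++ [PySem.Int.mod st.1 n]))
      (k, []) = pvG ks k := by
  induction ks with
  | nil => rfl
  | cons x r ih => rw [List.reverse_cons, List.foldl_append, ih]; rfl

theorem gen_digits_eq (ks : List Int) (k : Int) :
    gen_digits ks k = (pvG ks k).2.reverse := by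
  unfold gen_digits
  rw [gfold]

theorem total_foldl (ks : List Int) (t : Int) :
    ks.foldl (fun t n => t * max n 0) t = t * pvTotal ks := by
  induction ks generalizing t with
  | nil => simp [pvTotal]
  | cons x r ih =>
      simp only [pvTotal, List.foldl_cons, one_mul] at *
      rw [ih, ih (max x 0)]
      ring

theorem total_cons (x : Int) (r : List Int) : pvTotal (x :: r) = max x 0 * pvTotal r := by
  simp only [pvTotal, List.foldl_cons, one_mul]
  exact total_foldl r (max x 0)

theorem total_nonneg (ks : List Int) : 0 ≤ pvTotal ks := by
  induction ks with
  | nil => simp [pvTotal]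
  | cons x r ih => rw [total_cons]; exact mul_nonneg (le_max_right x 0) ih

theorem total_pos_all (ks : List Int) (h : 1 ≤ pvTotal ks) : ∀ n ∈ ks, 1 ≤ n := by
  induction ks with
  | nil => intro n hn; simp at hn
  | cons x r ih =>
      rw [total_cons] at h
      have hr0 : 0 ≤ pvTotal r := total_nonneg r
      have hx0 : 0 ≤ max x 0 := le_max_right x 0
      have hx1 : 1 ≤ max x 0 := by
        rcases (by omega : max x 0 = 0 ∨ 1 ≤ max x 0) with h0 | h1
        · rw [h0, zero_mul] at h; omega
        · exact h1
      have hr1 : 1 ≤ pvTotal r := by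
        rcases (by omega : pvTotal r = 0 ∨ 1 ≤ pvTotal r) with h0 | h1
        · rw [h0, mul_zero] at h; omega
        · exact h1
      intro n hn
      rcases List.mem_cons.mp hn with rfl | hn
      · omega
      · exact ih hr1 n hn

theorem digits_decompose (ks : List Int) (hall : ∀ n ∈ ks, 1 ≤ n) :
    ∀ i j : Int, 0 ≤ i → 0 ≤ j → j < pvTotal ks →
      pvG ks (i * pvTotal ks + j) = (i, (pvG ks j).2) := by
  induction ks with
  | nil =>
      intro i j hi hj hjlt
      have h1 : pvTotal ([] : List Int) = 1 := rfl
      rw [h1] at hjlt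
      have hj0 : j = 0 := by omega
      subst hj0
      simp [pvG, pvTotal]
  | cons x r ih =>
      intro i j hi hj hjlt
      have hx : 1 ≤ x := hall x (List.mem_cons_self ..)
      have hallr : ∀ n ∈ r, 1 ≤ n := fun n hn => hall n (List.mem_cons_of_mem x hn)
      have hT : pvTotal (x :: r) = x * pvTotal r := by
        rw [total_cons]; congr 1; omega
      rw [hT] at hjlt ⊢
      have hP0 : 0 ≤ pvTotal r := total_nonneg r
      have hP1 : 1 ≤ pvTotal r := by
        rcases (by omega : pvTotal r = 0 ∨ 1 ≤ pvTotal r) with h0 | h1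
        · rw [h0, mul_zero] at hjlt; omega
        · exact h1
      set P := pvTotal r with hPdef
      have hPpos : 0 < P := hP1
      set a := j / P with ha
      set b := j % P with hb
      have hb0 : 0 ≤ b := Int.emod_nonneg j (by omega)
      have hbP : b < P := Int.emod_lt_of_pos j hPpos
      have ha0 : 0 ≤ a := Int.ediv_nonneg hj (le_of_lt hPpos)
      have hax : a < x := by
        rw [ha, Int.ediv_lt_iff_lt_mul hPpos]
        omega
      have hdm := Int.mul_ediv_add_emod j P
      have hjab : j = a * P + b := by rw [ha, hb, mul_comm]; omega
      have hk : i * (x * P) + j = (i * x + a) * P + b := by rw [hjab]; ring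
      have hixa : 0 ≤ i * x + a := by positivity
      have h1 : pvG r (i * (x * P) + j) = (i * x + a, (pvG r b).2) := by
        rw [hk]; exact ih hallr (i * x + a) b hixa hb0 hbP
      have h2 : pvG r j = (a, (pvG r b).2) := by
        rw [hjab]; exact ih hallr a b ha0 hb0 hbP
      have hdiv : PySem.Int.floordiv (i * x + a) x = i := by
        rw [PySem.Int.floordiv_eq_ediv_of_pos (by omega)]
        rw [show i * x + a = a + i * x by ring, Int.add_mul_ediv_right a i (by omega : x ≠ 0)]
        rw [Int.ediv_eq_zero_of_lt ha0 hax]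
        omega
      have hmod : PySem.Int.mod (i * x + a) x = a := by
        rw [PySem.Int.mod_eq_emod_of_pos (by omega)]
        rw [show i * x + a = a + i * x by ring, Int.add_mul_emod_self_right]
        exact Int.emod_eq_of_lt ha0 hax
      have hmoda : PySem.Int.mod a x = a := by
        rw [PySem.Int.mod_eq_emod_of_pos (by omega)]
        exact Int.emod_eq_of_lt ha0 hax
      simp only [pvG, h1, h2, hdiv, hmod, hmoda]

theorem pyRange_shift (c b : Int) :
    PySem.List.pyRange c (c + b) 1 = (PySem.List.pyRange 0 b 1).map (fun j => c + j) := by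
  rw [PySem.List.pyRange_one, PySem.List.pyRange_one, List.map_map]
  simp [add_sub_cancel_left]

theorem pyRange_mul_split (m : Nat) (T : Int) (hT : 0 ≤ T) :
    PySem.List.pyRange 0 ((m : Int) * T) 1
    = (PySem.List.pyRange 0 (m : Int) 1).flatMap
        (fun i => (PySem.List.pyRange 0 T 1).map (fun j => i * T + j)) := by
  induction m with
  | zero => simp [PySem.List.pyRange_one_eq_nil]
  | succ m ih =>
      have hmm : ((m + 1 : Nat) : Int) = (m : Int) + 1 := by push_cast; ring
      rw [hmm]
      have hle1 : (0 : Int) ≤ (m : Int) * T := mul_nonneg (by positivity) hT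
      have hle2 : (m : Int) * T ≤ ((m : Int) + 1) * T := by nlinarith
      rw [show ((m : Int) + 1) * T = (m : Int) * T + T by ring]
      rw [PySem.List.pyRange_one_append 0 ((m : Int) * T) ((m : Int) * T + T) hle1 (by omega)]
      rw [pyRange_shift ((m : Int) * T) T]
      rw [PySem.List.pyRange_one_succ_right (by positivity)]
      rw [List.flatMap_append, ih]
      simp

theorem alt_def (ks : List Int) :
    gen_all_permutation_keys_alt ks
    = (PySem.List.pyRange 0 (pvTotal ks) 1).map (fun k => gen_digits ks k) := rfl

theorem alt_eq_pvProd (ks : List Int) : gen_all_permutation_keys_alt ks = pvProd ks := by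
  induction ks with
  | nil => decide
  | cons x r ih =>
      by_cases hx : x ≤ 0
      · have h0 : pvTotal (x :: r) = 0 := by
          rw [total_cons, show max x 0 = 0 by omega, zero_mul]
        rw [alt_def, h0, PySem.List.pyRange_one_eq_nil (by omega)]
        simp [pvProd, PySem.List.pyRange_one_eq_nil hx]
      · obtain ⟨m, hm⟩ : ∃ m : Nat, (m : Int) = x := ⟨x.toNat, Int.toNat_of_nonneg (by omega)⟩
        subst hm
        have hx1 : 1 ≤ (m : Int) := by omega
        have hT : pvTotal ((m : Int) :: r) = (m : Int) * pvTotal r := by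
          rw [total_cons]; congr 1; omega
        have hP0 : 0 ≤ pvTotal r := total_nonneg r
        by_cases hP : pvTotal r = 0
        · have hprodr : pvProd r = [] := by
            rw [← ih, alt_def, hP, PySem.List.pyRange_one_eq_nil (by omega)]
            rfl
          rw [alt_def, hT, hP, mul_zero, PySem.List.pyRange_one_eq_nil (by omega)]
          simp [pvProd, hprodr]
        · have hP1 : 1 ≤ pvTotal r := by omega
          have hallr : ∀ n ∈ r, 1 ≤ n := total_pos_all r hP1
          rw [alt_def, hT, pyRange_mul_split m (pvTotal r) hP0, List.map_flatMap]
          have hrhs : pvProd ((m : Int) :: r)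
              = (PySem.List.pyRange 0 (m : Int) 1).flatMap
                  (fun i => (PySem.List.pyRange 0 (pvTotal r) 1).map
                    (fun j => i :: gen_digits r j)) := by
            rw [show pvProd ((m : Int) :: r)
                = (PySem.List.pyRange 0 (m : Int) 1).flatMap
                    (fun i => (pvProd r).map (fun e => i :: e)) from rfl, ← ih, alt_def]
            simp [List.map_map, Function.comp_def]
          rw [hrhs]
          apply List.flatMap_congr
          intro i hi
          have hi' : 0 ≤ i ∧ i < (m : Int) := by
            have := PySem.List.mem_pyRange_one.mp hi; omega
          rw [List.map_map]
          apply List.map_congr_left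
          intro j hj
          have hj' : 0 ≤ j ∧ j < pvTotal r := by
            have := PySem.List.mem_pyRange_one.mp hj; omega
          have hdec : pvG r (i * pvTotal r + j) = (i, (pvG r j).2) :=
            digits_decompose r hallr i j hi'.1 hj'.1 hj'.2
          have hmodi : PySem.Int.mod i (m : Int) = i := by
            rw [PySem.Int.mod_eq_emod_of_pos (by omega)]
            exact Int.emod_eq_of_lt hi'.1 (by omega)
          show gen_digits ((m : Int) :: r) (i * pvTotal r + j) = i :: gen_digits r j
          rw [gen_digits_eq, gen_digits_eq]
          simp only [pvG, hdec, hmodi]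
          simp

-- ===== VERDICT (by name: the statement is the Claim_ definition above) =====
theorem gen_all_permutation_keys_spec : Claim_equal_gen_all_permutation_keys := by
  intro ks _ hpre
  unfold Spec_gen_all_permutation_keys
  rw [alt_eq_pvProd, gen_eq_pvProd ks hpre]
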